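-- pv_equiv track=rewrite | github.com/zakipauzi/text-similarity-code-documentation | doc_extract.py | remove_code_blocks
-- ===== SOURCE A (Python) =====
-- def remove_code_blocks(old_text):
--     start = True
--     cont = False
--
--     new_text = []
--
--     for x in old_text:
--         if x.startswith('```'):
--             if start:
--                 start = False
--                 cont = True
--             else:
--                 start = True
--                 cont = False
--         else:
--             if not cont:
--                 new_text.append(x)
--
--     return new_text
-- ===== SOURCE B (Python) =====
-- def remove_code_blocks(old_text):
--     fence = [x.startswith('```') for x in old_text]
--     prefix = []
--     c = 0
--     for f in fence:
--         prefix.append(c)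
--         c += f
--     return [x for x, f, p in zip(old_text, fence, prefix) if not f and p % 2 == 0]
-- ===== Notes on version B (the rewrite author's own statement) =====
-- stated objective: alternative
-- what changed: Replaces the inline two-boolean toggle state machine with a table-then-filter decomposition: precompute the fence flags and an exclusive running fence count, then keep each non-fence line whose preceding fence count is even.
import Mathlib
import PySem

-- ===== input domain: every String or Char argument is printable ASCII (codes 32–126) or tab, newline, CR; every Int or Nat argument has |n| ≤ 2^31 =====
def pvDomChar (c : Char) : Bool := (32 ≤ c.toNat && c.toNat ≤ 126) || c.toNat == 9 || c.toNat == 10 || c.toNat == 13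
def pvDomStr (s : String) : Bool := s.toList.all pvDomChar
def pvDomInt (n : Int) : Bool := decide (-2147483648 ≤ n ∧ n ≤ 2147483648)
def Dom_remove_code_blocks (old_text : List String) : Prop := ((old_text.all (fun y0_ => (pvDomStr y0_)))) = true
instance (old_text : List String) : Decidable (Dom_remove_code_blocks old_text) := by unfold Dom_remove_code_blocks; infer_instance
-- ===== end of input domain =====

-- B replaces A's inline two-boolean toggle state machine by a fence-flag table plus an
-- exclusive prefix fence count, then a single filter; objective: alternative decomposition.

-- ===== PORT A =====
-- A: toggle state machine over (start, cont) appending kept lines.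
def remove_code_blocks (old_text : List String) : List String :=
  (old_text.foldl
    (fun (s : Bool × Bool × List String) x =>
      if PySem.Str.startswith x "```" then
        if s.1 then (false, true, s.2.2) else (true, false, s.2.2)
      else
        if !s.2.1 then (s.1, s.2.1, s.2.2 ++ [x]) else s)
    (true, false, [])).2.2

-- ===== PORT B =====
-- B: fence table, exclusive prefix counts, then a filter on (line, fence, prefix) triples.
def remove_code_blocks_alt (old_text : List String) : List String :=
  let fence := old_text.map (fun x => PySem.Str.startswith x "```")
  let prefixCounts :=
    (fence.foldl (fun (s : Int × List Int) f =>
      (s.1 + (if f then 1 else 0), s.2 ++ [s.1])) ((0 : Int), ([] : List Int))).2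
  ((old_text.zip (fence.zip prefixCounts)).filter
    (fun p => !p.2.1 && (PySem.Int.mod p.2.2 2 == 0))).map Prod.fst

-- ===== PRECONDITION & SPEC =====
def Spec_remove_code_blocks (old_text : List String) (out : List String) : Prop := out = remove_code_blocks_alt old_text
instance (old_text : List String) (out : List String) : Decidable (Spec_remove_code_blocks old_text out) := by unfold Spec_remove_code_blocks; infer_instance

-- ===== CLAIM (what is proved, stated in full; the proofs are below) =====
def Claim_equal_remove_code_blocks : Prop := ∀ (old_text : List String), Dom_remove_code_blocks old_text → Spec_remove_code_blocks old_text (remove_code_blocks old_text)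

-- ===== LEMMAS AND PROOFS =====

-- proof-side names (definitionally what the ports use) so simp leaves them alone
def pvFence (x : String) : Bool := PySem.Str.startswith x "```"
def pvEven (c : Int) : Bool := PySem.Int.mod c 2 == 0

-- common reference: simple recursion carrying the parity of the fences seen so far
def pvSpecGo (even : Bool) : List String → List String
  | [] => []
  | x :: xs =>
      if pvFence x then pvSpecGo (!even) xs
      else if even then x :: pvSpecGo even xs else pvSpecGo even xs

-- A's fold (with cont = !start) from any accumulator computes acc ++ pvSpecGo start
theorem pvA_gen (l : List String) : ∀ (s : Bool) (acc : List String),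
    (l.foldl
      (fun (st : Bool × Bool × List String) x =>
        if pvFence x then
          if st.1 then (false, true, st.2.2) else (true, false, st.2.2)
        else
          if !st.2.1 then (st.1, st.2.1, st.2.2 ++ [x]) else st)
      (s, !s, acc)).2.2 = acc ++ pvSpecGo s l := by
  induction l with
  | nil => intro s acc; simp [pvSpecGo]
  | cons x xs ih =>
    intro s acc
    simp only [List.foldl_cons, pvSpecGo]
    cases hf : pvFence x
    · cases s
      · simpa [hf] using ih false acc
      · simpa [hf] using ih true (acc ++ [x])
    · cases s
      · simpa [hf] using ih true acc
      · simpa [hf] using ih false acc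

-- B's prefix-count list, recursively
def pvPref (c : Int) : List Bool → List Int
  | [] => []
  | f :: fs => c :: pvPref (c + (if f then 1 else 0)) fs

theorem pvPref_fold (fs : List Bool) : ∀ (c : Int) (acc : List Int),
    (fs.foldl (fun (s : Int × List Int) f =>
      (s.1 + (if f then 1 else 0), s.2 ++ [s.1])) (c, acc)).2 = acc ++ pvPref c fs := by
  induction fs with
  | nil => intro c acc; simp [pvPref]
  | cons f fs ih => intro c acc; simp [pvPref, ih]

theorem pvEven_succ (c : Int) : pvEven (c + 1) = !pvEven c := by
  unfold pvEven
  rw [PySem.Int.mod_eq_emod_of_pos (by norm_num), PySem.Int.mod_eq_emod_of_pos (by norm_num)]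
  cases hb : (c % 2 == 0) <;> simp_all <;> omega

-- B's zip-filter-map equals pvSpecGo at the counter's parity
theorem pvB_gen (l : List String) : ∀ (c : Int),
    ((l.zip ((l.map pvFence).zip (pvPref c (l.map pvFence)))).filter
      (fun p => !p.2.1 && pvEven p.2.2)).map Prod.fst
    = pvSpecGo (pvEven c) l := by
  induction l with
  | nil => intro c; simp [pvSpecGo]
  | cons x xs ih =>
    intro c
    simp only [List.map_cons, pvPref, List.zip_cons_cons, List.filter_cons, pvSpecGo]
    cases hf : pvFence x
    · cases hc : pvEven c <;> simp [hc, ih]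
    · cases hc : pvEven c <;> simp [hc, ih, pvEven_succ]

-- ===== VERDICT (by name: the statement is the Claim_ definition above) =====
theorem remove_code_blocks_spec : Claim_equal_remove_code_blocks := by
  intro l _
  show remove_code_blocks l = remove_code_blocks_alt l
  have hA : remove_code_blocks l =
      (l.foldl
        (fun (st : Bool × Bool × List String) x =>
          if pvFence x then
            if st.1 then (false, true, st.2.2) else (true, false, st.2.2)
          else
            if !st.2.1 then (st.1, st.2.1, st.2.2 ++ [x]) else st)
        (true, !true, [])).2.2 := rfl
  have hB : remove_code_blocks_alt l =
      ((l.zip ((l.map pvFence).zip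
        (((l.map pvFence).foldl (fun (s : Int × List Int) f =>
          (s.1 + (if f then 1 else 0), s.2 ++ [s.1])) ((0 : Int), ([] : List Int))).2))).filter
        (fun p => !p.2.1 && pvEven p.2.2)).map Prod.fst := rfl
  rw [hA, hB, pvA_gen l true [], pvPref_fold _ 0 []]
  simp only [List.nil_append]
  rw [pvB_gen l 0]
  rfl
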